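-- pv_equiv track=rewrite | github.com/bachschmidmedia/py-get-email-firstname-lastname | get-names-from-mail.py | trans_utf8
-- ===== SOURCE A (Python) =====
-- def trans_utf8(names):
-- 	specials = {
-- 		'Ae': 'Ä',
-- 		'ae': 'ä',
-- 		'Oe': 'Ö',
-- 		'oe': 'ö',
-- 		'Ue': 'Ü',
-- 		'ue': 'ü',
-- 		'ss': 'ß'
-- 	}
--
-- 	for s_orig in specials:
-- 		s_utf8 = specials[s_orig]
-- 		names = [name.replace(s_orig, s_utf8) for name in names]
--
-- 	return names
-- ===== SOURCE B (Python) =====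
-- def trans_utf8(names):
--     specials = {
--         'Ae': 'Ä',
--         'ae': 'ä',
--         'Oe': 'Ö',
--         'oe': 'ö',
--         'Ue': 'Ü',
--         'ue': 'ü',
--         'ss': 'ß'
--     }
--     result = []
--     for name in names:
--         out = []
--         i = 0
--         n = len(name)
--         while i < n:
--             rep = specials.get(name[i:i + 2])
--             if rep is not None:
--                 out.append(rep)
--                 i += 2
--             else:
--                 out.append(name[i])
--                 i += 1
--         result.append(''.join(out))
--     return result
-- ===== Notes on version B (the rewrite author's own statement) =====
-- stated objective: alternative
-- what changed: Replaces seven sequential whole-list str.replace rebuilds with a single left-to-right scan per name that looks up each two-character window in the replacement dict once; patterns are disjoint in their first character and replacements are non-ASCII, so one pass reproduces the cascade exactly.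
import Mathlib
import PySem

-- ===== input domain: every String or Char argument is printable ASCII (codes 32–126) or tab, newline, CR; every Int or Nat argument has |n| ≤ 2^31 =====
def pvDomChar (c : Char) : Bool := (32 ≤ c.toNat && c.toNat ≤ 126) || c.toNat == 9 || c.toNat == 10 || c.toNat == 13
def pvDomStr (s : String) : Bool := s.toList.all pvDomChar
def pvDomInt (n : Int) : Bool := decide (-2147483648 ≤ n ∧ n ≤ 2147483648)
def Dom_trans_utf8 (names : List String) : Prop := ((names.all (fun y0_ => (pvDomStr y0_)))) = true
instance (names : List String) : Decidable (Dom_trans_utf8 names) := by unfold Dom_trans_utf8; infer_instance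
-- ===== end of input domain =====

-- B replaces A's seven sequential whole-list str.replace rebuilds by one left-to-right
-- scan per name looking up each two-character window in the same mapping (objective: alternative).

-- ===== PORT A =====
-- A iterates over the dict's keys in insertion order, each time rebuilding the whole list
-- with name.replace(key, specials[key]).
def trans_utf8 (names : List String) : List String :=
  let specials : List (String × String) :=
    [("Ae", "Ä"), ("ae", "ä"), ("Oe", "Ö"), ("oe", "ö"), ("Ue", "Ü"), ("ue", "ü"), ("ss", "ß")]
  specials.foldl (fun names p => names.map (fun name => PySem.Str.replace name p.1 p.2)) names

-- ===== PORT B =====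
-- Source B's `specials.get(name[i:i+2])` on the two-character window, rendered as a direct
-- lookup on the window's two characters (exact: all keys have length 2, so the
-- one-character final window never matches and falls into the [c] case below)
def pairRep (c1 c2 : Char) : Option Char :=
  if c1 = 'A' ∧ c2 = 'e' then some 'Ä'
  else if c1 = 'a' ∧ c2 = 'e' then some 'ä'
  else if c1 = 'O' ∧ c2 = 'e' then some 'Ö'
  else if c1 = 'o' ∧ c2 = 'e' then some 'ö'
  else if c1 = 'U' ∧ c2 = 'e' then some 'Ü'
  else if c1 = 'u' ∧ c2 = 'e' then some 'ü'
  else if c1 = 's' ∧ c2 = 's' then some 'ß'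
  else none

-- Source B's `while i < n` scan: look at the window name[i:i+2]; on a hit emit the
-- replacement and advance by 2, otherwise emit name[i] and advance by 1
def altScan : List Char → List Char
  | [] => []
  | [c] => [c]
  | c1 :: c2 :: t =>
    match pairRep c1 c2 with
    | some r => r :: altScan t
    | none => c1 :: altScan (c2 :: t)

def trans_utf8_alt (names : List String) : List String :=
  names.map (fun name => String.ofList (altScan name.toList))

-- ===== PRECONDITION & SPEC =====
def Spec_trans_utf8 (names : List String) (out : List String) : Prop := out = trans_utf8_alt names
instance (names : List String) (out : List String) : Decidable (Spec_trans_utf8 names out) := by unfold Spec_trans_utf8; infer_instance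

-- ===== CLAIM (what is proved, stated in full; the proofs are below) =====
def Claim_equal_trans_utf8 : Prop := ∀ (names : List String), Dom_trans_utf8 names → Spec_trans_utf8 names (trans_utf8 names)

-- ===== LEMMAS AND PROOFS =====

-- single-pattern, fuel-free left-to-right replace: the meaning of str.replace for a
-- two-character pattern
def rep1 (a b r : Char) : List Char → List Char
  | c1 :: c2 :: t => if c1 = a ∧ c2 = b then r :: rep1 a b r t else c1 :: rep1 a b r (c2 :: t)
  | l => l

-- sequential composition of single-pattern replaces, in list order
def comp : List (Char × Char × Char) → List Char → List Char
  | [], s => s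
  | p :: ps, s => comp ps (rep1 p.1 p.2.1 p.2.2 s)

def P7 : List (Char × Char × Char) :=
  [('A','e','Ä'), ('a','e','ä'), ('O','e','Ö'), ('o','e','ö'), ('U','e','Ü'), ('u','e','ü'), ('s','s','ß')]

theorem rep1_one (a b r c : Char) : rep1 a b r [c] = [c] := rfl

theorem rep1_match (a b r : Char) (t : List Char) :
    rep1 a b r (a :: b :: t) = r :: rep1 a b r t := by simp [rep1]

theorem rep1_ne₁ (a b r c : Char) (h : c ≠ a) (t : List Char) :
    rep1 a b r (c :: t) = c :: rep1 a b r t := by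
  cases t with
  | nil => rfl
  | cons c2 t2 => simp [rep1, h]

theorem rep1_ne₂ (a b r c1 c2 : Char) (h : c2 ≠ b) (t : List Char) :
    rep1 a b r (c1 :: c2 :: t) = c1 :: rep1 a b r (c2 :: t) := by
  simp [rep1, h]

theorem rep1_head (a b r c : Char) (t : List Char) :
    ∃ z zs, rep1 a b r (c :: t) = z :: zs ∧ (z = c ∨ z = r) := by
  cases t with
  | nil => exact ⟨c, [], rfl, Or.inl rfl⟩
  | cons c2 t2 =>
    by_cases h : c = a ∧ c2 = b
    · exact ⟨r, rep1 a b r t2, by simp [rep1, h], Or.inr rfl⟩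
    · exact ⟨c, rep1 a b r (c2 :: t2), by simp [rep1, h], Or.inl rfl⟩

theorem comp_append (ps qs : List (Char × Char × Char)) (s : List Char) :
    comp (ps ++ qs) s = comp qs (comp ps s) := by
  induction ps generalizing s with
  | nil => rfl
  | cons p ps ih => simp [comp, ih]

-- pass a single char over a whole composition, by first-character mismatch
theorem comp_pass1 (ps : List (Char × Char × Char)) (c : Char)
    (h : ∀ p ∈ ps, c ≠ p.1) (X : List Char) :
    comp ps (c :: X) = c :: comp ps X := by
  induction ps generalizing X with
  | nil => rfl
  | cons p ps ih =>
    simp only [comp, rep1_ne₁ p.1 p.2.1 p.2.2 c (h p (by simp)) X]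
    exact ih (fun q hq => h q (by simp [hq])) _

-- pass a non-matching two-char window over a composition whose replacement characters
-- never equal a pattern's second character
theorem comp_pass2 (ps : List (Char × Char × Char)) (c1 c2 : Char)
    (h1 : ∀ p ∈ ps, c1 ≠ p.1 ∨ c2 ≠ p.2.1)
    (h2 : ∀ p ∈ ps, ∀ q ∈ ps, p.2.2 ≠ q.2.1) (t : List Char) :
    comp ps (c1 :: c2 :: t) = c1 :: comp ps (c2 :: t) := by
  induction ps generalizing c2 t with
  | nil => rfl
  | cons p ps ih =>
    have hpass : rep1 p.1 p.2.1 p.2.2 (c1 :: c2 :: t) = c1 :: rep1 p.1 p.2.1 p.2.2 (c2 :: t) := by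
      rcases h1 p (by simp) with h | h
      · exact rep1_ne₁ _ _ _ _ h _
      · exact rep1_ne₂ _ _ _ _ _ h _
    obtain ⟨z, zs, hz, hzor⟩ := rep1_head p.1 p.2.1 p.2.2 c2 t
    have h1' : ∀ q ∈ ps, c1 ≠ q.1 ∨ z ≠ q.2.1 := by
      intro q hq
      rcases hzor with rfl | rfl
      · exact h1 q (by simp [hq])
      · exact Or.inr (h2 p (by simp) q (by simp [hq]))
    have h2' : ∀ p' ∈ ps, ∀ q ∈ ps, p'.2.2 ≠ q.2.1 := by
      intro p' hp' q hq; exact h2 p' (by simp [hp']) q (by simp [hq])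
    calc comp (p :: ps) (c1 :: c2 :: t)
        = comp ps (c1 :: z :: zs) := by simp [comp, hpass, hz]
      _ = c1 :: comp ps (z :: zs) := by exact ih z h1' h2' zs
      _ = c1 :: comp (p :: ps) (c2 :: t) := by simp [comp, hz]

-- a matching window: patterns before it pass over both characters, it fires, patterns
-- after it pass over the replacement character
theorem comp_hit (pre post : List (Char × Char × Char)) (a b r : Char) (t : List Char)
    (h1 : ∀ p ∈ pre, a ≠ p.1) (h2 : ∀ p ∈ pre, b ≠ p.1) (h3 : ∀ p ∈ post, r ≠ p.1) :
    comp (pre ++ (a, b, r) :: post) (a :: b :: t) = r :: comp (pre ++ (a, b, r) :: post) t := by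
  rw [show pre ++ (a, b, r) :: post = pre ++ ([(a, b, r)] ++ post) from by simp]
  rw [comp_append, comp_append, comp_append, comp_append]
  rw [comp_pass1 pre a h1, comp_pass1 pre b h2]
  simp only [comp, rep1_match]
  rw [comp_pass1 post r h3]

-- a window that matches no pattern is passed through unchanged
theorem pairRep_none (c1 c2 : Char) (h : pairRep c1 c2 = none) :
    ∀ p ∈ P7, c1 ≠ p.1 ∨ c2 ≠ p.2.1 := by
  intro p hp
  fin_cases hp <;>
    · by_contra hc
      push Not at hc
      obtain ⟨rfl, rfl⟩ := hc
      simp [pairRep] at h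

-- the per-string main lemma: the seven sequential replaces equal the single scan
theorem comp_eq_altScan : ∀ n s, s.length ≤ n → comp P7 s = altScan s := by
  intro n
  induction n with
  | zero =>
    intro s hs
    have : s = [] := List.length_eq_zero_iff.mp (Nat.le_zero.mp hs)
    subst this; rfl
  | succ n ih =>
    intro s hs
    match s with
    | [] => rfl
    | [c] => simp [comp, P7, rep1_one, altScan]
    | c1 :: c2 :: t =>
      have hlen2 : t.length ≤ n := by simp at hs; omega
      have hlen1 : (c2 :: t).length ≤ n := by simp at hs ⊢; omega
      rcases hp : pairRep c1 c2 with _ | r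
      · -- no pattern matches the window: both sides pass c1 through
        rw [comp_pass2 P7 c1 c2 (pairRep_none c1 c2 hp) (by decide) t, ih _ hlen1]
        simp [altScan, hp]
      · -- exactly one pattern matches: locate it in P7 and fire it
        have step : comp P7 (c1 :: c2 :: t) = r :: comp P7 t := by
          unfold pairRep at hp
          split_ifs at hp with h1 h2 h3 h4 h5 h6 h7 <;>
            (obtain ⟨rfl, rfl⟩ := ‹_ ∧ _›
             injection hp with hr
             subst hr
             first
               | exact comp_hit [] _ _ _ _ t (by decide) (by decide) (by decide)
               | exact comp_hit [('A','e','Ä')] _ _ _ _ t (by decide) (by decide) (by decide)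
               | exact comp_hit [('A','e','Ä'),('a','e','ä')] _ _ _ _ t (by decide) (by decide) (by decide)
               | exact comp_hit [('A','e','Ä'),('a','e','ä'),('O','e','Ö')] _ _ _ _ t (by decide) (by decide) (by decide)
               | exact comp_hit [('A','e','Ä'),('a','e','ä'),('O','e','Ö'),('o','e','ö')] _ _ _ _ t (by decide) (by decide) (by decide)
               | exact comp_hit [('A','e','Ä'),('a','e','ä'),('O','e','Ö'),('o','e','ö'),('U','e','Ü')] _ _ _ _ t (by decide) (by decide) (by decide)
               | exact comp_hit [('A','e','Ä'),('a','e','ä'),('O','e','Ö'),('o','e','ö'),('U','e','Ü'),('u','e','ü')] _ _ _ _ t (by decide) (by decide) (by decide))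
        rw [step, ih t hlen2]
        simp only [altScan, hp]

-- PySem.Chars.replace with a two-character pattern is exactly rep1
theorem go_eq_rep1 (a b r : Char) :
    ∀ fuel l acc, l.length ≤ fuel →
      PySem.Chars.replace.go [a, b] [r] fuel l acc = acc.reverse ++ rep1 a b r l := by
  intro fuel
  induction fuel with
  | zero =>
    intro l acc hl
    have : l = [] := List.length_eq_zero_iff.mp (Nat.le_zero.mp hl)
    subst this
    rw [PySem.Chars.replace.go]; simp [rep1]
  | succ fuel ih =>
    intro l acc hl
    match l with
    | [] => rw [PySem.Chars.replace.go] <;> simp [rep1]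
    | [c] =>
      rw [PySem.Chars.replace.go]
      have : ([a, b].isPrefixOf [c]) = false := by
        simp [List.isPrefixOf]
      simp only [this, Bool.false_eq_true, if_false]
      rw [ih [] (c :: acc) (by simp)]
      simp [rep1]
    | c1 :: c2 :: t =>
      rw [PySem.Chars.replace.go]
      by_cases h : c1 = a ∧ c2 = b
      · obtain ⟨rfl, rfl⟩ := h
        have hpre : ([c1, c2].isPrefixOf (c1 :: c2 :: t)) = true := by simp [List.isPrefixOf]
        simp only [hpre, if_true]
        rw [show List.drop [c1,c2].length (c1 :: c2 :: t) = t from rfl]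
        rw [ih t ([r].reverse ++ acc) (by simp at hl ⊢; omega)]
        simp [rep1_match]
      · have hpre : ([a, b].isPrefixOf (c1 :: c2 :: t)) = false := by
          simp [List.isPrefixOf]
          intro ha hb
          exact h ⟨ha.symm, hb.symm⟩
        simp only [hpre, Bool.false_eq_true, if_false]
        rw [ih (c2 :: t) (c1 :: acc) (by simp at hl ⊢; omega)]
        have : rep1 a b r (c1 :: c2 :: t) = c1 :: rep1 a b r (c2 :: t) := by
          simp [rep1, h]
        rw [this]; simp

theorem chars_replace_eq_rep1 (a b r : Char) (s : List Char) :
    PySem.Chars.replace s [a, b] [r] = rep1 a b r s := by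
  rw [PySem.Chars.replace]
  simp only [List.isEmpty, Bool.false_eq_true, if_false]
  exact go_eq_rep1 a b r s.length s [] le_rfl

-- A's whole pipeline on one string, at the character level
theorem aStr_eq_comp (name : String) :
    (PySem.Str.replace (PySem.Str.replace (PySem.Str.replace (PySem.Str.replace
      (PySem.Str.replace (PySem.Str.replace (PySem.Str.replace name
        "Ae" "Ä") "ae" "ä") "Oe" "Ö") "oe" "ö") "Ue" "Ü") "ue" "ü") "ss" "ß").toList
      = comp P7 name.toList := by
  simp only [PySem.Str.toList_replace]
  simp only [show ("Ae" : String).toList = ['A','e'] from rfl,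
    show ("ae" : String).toList = ['a','e'] from rfl,
    show ("Oe" : String).toList = ['O','e'] from rfl,
    show ("oe" : String).toList = ['o','e'] from rfl,
    show ("Ue" : String).toList = ['U','e'] from rfl,
    show ("ue" : String).toList = ['u','e'] from rfl,
    show ("ss" : String).toList = ['s','s'] from rfl,
    show ("Ä" : String).toList = ['Ä'] from rfl,
    show ("ä" : String).toList = ['ä'] from rfl,
    show ("Ö" : String).toList = ['Ö'] from rfl,
    show ("ö" : String).toList = ['ö'] from rfl,
    show ("Ü" : String).toList = ['Ü'] from rfl,
    show ("ü" : String).toList = ['ü'] from rfl,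
    show ("ß" : String).toList = ['ß'] from rfl]
  simp only [chars_replace_eq_rep1]
  rfl

-- ===== VERDICT (by name: the statement is the Claim_ definition above) =====
theorem trans_utf8_spec : Claim_equal_trans_utf8 := by
  intro names _
  show trans_utf8 names = trans_utf8_alt names
  unfold trans_utf8 trans_utf8_alt
  simp only [List.foldl, List.map_map]
  apply List.map_congr_left
  intro name _
  show PySem.Str.replace (PySem.Str.replace (PySem.Str.replace (PySem.Str.replace
      (PySem.Str.replace (PySem.Str.replace (PySem.Str.replace name
        "Ae" "Ä") "ae" "ä") "Oe" "Ö") "oe" "ö") "Ue" "Ü") "ue" "ü") "ss" "ß"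
      = String.ofList (altScan name.toList)
  rw [← comp_eq_altScan name.toList.length name.toList le_rfl]
  rw [← aStr_eq_comp name, String.ofList_toList]
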